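-- pv_equiv track=rewrite | github.com/siryuon/Algorithm_Practice | HackerRank/Roads_and_Libraries.py | dfs
-- ===== SOURCE A (Python) =====
-- def dfs(nodes, node, visited):
--     if visited[node]:
--         return 0
--     visited[node] = 1
--     cnt = 1
--     for neighbor in nodes[node]:
--         cnt += dfs(nodes,neighbor, visited)
--
--     return cnt
-- ===== SOURCE B (Python) =====
-- def dfs(nodes, node, visited):
--     # Iterative DFS with an explicit stack (pop-time visited check).
--     # Neighbors are pushed in reverse so the traversal order and the
--     # in-place mutation of `visited` match the recursive version exactly.
--     stack = [node]
--     cnt = 0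
--     while stack:
--         v = stack.pop()
--         if visited[v]:
--             continue
--         visited[v] = 1
--         cnt += 1
--         stack.extend(reversed(nodes[v]))
--     return cnt
-- ===== Notes on version B (the rewrite author's own statement) =====
-- stated objective: alternative
-- what changed: Replaces the recursive DFS with an iterative explicit-stack DFS (pop-time visited check, neighbors pushed in reverse), removing recursion entirely while producing the same count and the same in-place visited mutation.
-- outside the precondition, e.g. on dfs({0: []}, 0, {0: 0, 5: 0}): A returns 1, B returns 1
import Mathlib
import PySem

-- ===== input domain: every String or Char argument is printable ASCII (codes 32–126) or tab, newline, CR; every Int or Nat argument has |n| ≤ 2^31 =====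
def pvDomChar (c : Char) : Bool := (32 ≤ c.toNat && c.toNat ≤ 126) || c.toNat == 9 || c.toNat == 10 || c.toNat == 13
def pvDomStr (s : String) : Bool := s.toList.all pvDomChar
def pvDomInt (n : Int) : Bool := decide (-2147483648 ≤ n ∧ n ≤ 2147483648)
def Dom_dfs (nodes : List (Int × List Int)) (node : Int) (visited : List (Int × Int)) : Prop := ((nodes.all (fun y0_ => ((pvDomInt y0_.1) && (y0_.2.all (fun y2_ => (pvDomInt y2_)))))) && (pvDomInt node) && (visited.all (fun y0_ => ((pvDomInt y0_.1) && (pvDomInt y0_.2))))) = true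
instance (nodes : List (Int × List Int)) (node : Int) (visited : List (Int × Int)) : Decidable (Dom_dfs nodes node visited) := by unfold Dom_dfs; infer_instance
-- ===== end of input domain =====

-- B replaces A's recursion by an iterative explicit-stack DFS (alternative decomposition,
-- same cost). Both Pythons mutate `visited` in place identically; the theorems here are
-- about the RETURN value.

-- ===== PORT A =====
-- dict lookup, first match (Python dict has unique keys; exact there)
def aget? {α : Type} (d : List (Int × α)) (k : Int) : Option α :=
  match d with
  | [] => none
  | (k', v) :: rest => if k' = k then some v else aget? rest k

-- d[k] = v : overwrite first match in place, append if absent (exact for Python dict)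
def dset (d : List (Int × Int)) (k v : Int) : List (Int × Int) :=
  match d with
  | [] => [(k, v)]
  | (k', v') :: rest => if k' = k then (k, v) :: rest else (k', v') :: dset rest k v

-- number of falsy (= 0) entries: the fuel bound / termination measure for the DFS
def zeros (d : List (Int × Int)) : Nat := d.countP (fun p => p.2 = 0)

-- A's recursion, fuelled by the recursion depth bound (each level marks one falsy entry,
-- so fuel `zeros visited + 1` is never exhausted on inputs Pre_ admits).
-- `none` lookups are Python KeyErrors, excluded by Pre_.
mutual
def dfsFuel (fuel : Nat) (nodes : List (Int × List Int)) (node : Int)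
    (visited : List (Int × Int)) : Int × List (Int × Int) :=
  match fuel with
  | 0 => (0, visited)
  | f + 1 =>
    match aget? visited node with
    | none => (0, visited)
    | some v =>
      if v ≠ 0 then (0, visited)
      else runList f nodes ((aget? nodes node).getD []) 1 (dset visited node 1)
termination_by (fuel, 0)
decreasing_by exact Prod.Lex.left _ _ (Nat.lt_succ_self _)
-- the `for neighbor in nodes[node]` loop, threading (cnt, visited)
def runList (fuel : Nat) (nodes : List (Int × List Int)) (l : List Int) (cnt : Int)
    (visited : List (Int × Int)) : Int × List (Int × Int) :=
  match l with
  | [] => (cnt, visited)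
  | nb :: t =>
    let r := dfsFuel fuel nodes nb visited
    runList fuel nodes t (cnt + r.1) r.2
termination_by (fuel, l.length + 1)
decreasing_by
  · exact Prod.Lex.right _ (Nat.succ_pos _)
  · exact Prod.Lex.right _ (Nat.lt_succ_self _)
end

def dfs (nodes : List (Int × List Int)) (node : Int) (visited : List (Int × Int)) : Int :=
  (dfsFuel (zeros visited + 1) nodes node visited).1

-- ===== PORT B =====
-- marking a falsy entry strictly decreases `zeros` (termination of the while loop)
theorem zeros_dset_lt (d : List (Int × Int)) (k : Int) (h : aget? d k = some 0) :
    zeros (dset d k 1) < zeros d := by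
  induction d with
  | nil => simp [aget?] at h
  | cons p rest ih =>
    obtain ⟨k', v'⟩ := p
    by_cases hk : k' = k
    · subst hk
      simp [aget?] at h
      subst h
      simp [dset, zeros]
    · simp [aget?, hk] at h
      have := ih h
      simp [dset, hk, zeros, List.countP_cons] at *
      omega

-- the while loop: stack head = top of Python's stack; `stack.pop()` + pushing the
-- reversed adjacency list = consing the adjacency list in order onto the rest.
-- `none` lookups are Python KeyErrors, excluded by Pre_.
def loopB (nodes : List (Int × List Int)) (stack : List Int) (visited : List (Int × Int))
    (cnt : Int) : Int :=
  match stack with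
  | [] => cnt
  | v :: rest =>
    if h : aget? visited v = some 0 then
      -- `visited[v]` is falsy: mark, count, push the (reversed-in-Python) adjacency list
      loopB nodes (((aget? nodes v).getD []) ++ rest) (dset visited v 1) (cnt + 1)
    else
      -- `visited[v]` truthy: `continue` (a `none` lookup is a Python KeyError, outside Pre_)
      loopB nodes rest visited cnt
termination_by (zeros visited, stack.length)
decreasing_by
  · exact Prod.Lex.left _ _ (zeros_dset_lt _ _ h)
  · exact Prod.Lex.right _ (Nat.lt_succ_self _)

def dfs_alt (nodes : List (Int × List Int)) (node : Int) (visited : List (Int × Int)) : Int :=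
  loopB nodes [node] visited 0

-- ===== PRECONDITION & SPEC =====
-- Pre_ excludes the inputs on which A raises KeyError (start node not a visited key, or an
-- unvisited start with a key/neighbor missing from the dicts; duplicate keys never arise from a
-- Python dict, so requiring distinct keys excludes nothing the tester can produce); coherence is a
-- closed-form overapproximation of reachability, so it also excludes some incoherent inputs whose
-- unreachable parts A never touches (A and B return the same value there).
def Pre_dfs (nodes : List (Int × List Int)) (node : Int) (visited : List (Int × Int)) : Prop :=
  (visited.map Prod.fst).Nodup ∧
  node ∈ visited.map Prod.fst ∧
  ((∃ p ∈ visited, p.1 = node ∧ p.2 ≠ 0) ∨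
    ((∀ p ∈ visited, p.1 ∈ nodes.map Prod.fst) ∧
     (∀ p ∈ nodes, ∀ m ∈ p.2, m ∈ visited.map Prod.fst)))
instance (nodes : List (Int × List Int)) (node : Int) (visited : List (Int × Int)) : Decidable (Pre_dfs nodes node visited) := by unfold Pre_dfs; infer_instance

def pvWitness_dfs : (List (Int × List Int)) × Int × (List (Int × Int)) :=
  ([(0, [1]), (1, [0])], 0, [(0, 0), (1, 0)])

def Spec_dfs (nodes : List (Int × List Int)) (node : Int) (visited : List (Int × Int)) (out : Int) : Prop := out = dfs_alt nodes node visited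
instance (nodes : List (Int × List Int)) (node : Int) (visited : List (Int × Int)) (out : Int) : Decidable (Spec_dfs nodes node visited out) := by unfold Spec_dfs; infer_instance

-- ===== CLAIM (what is proved, stated in full; the proofs are below) =====
def Claim_equal_dfs : Prop := ∀ (nodes : List (Int × List Int)) (node : Int) (visited : List (Int × Int)), Dom_dfs nodes node visited → Pre_dfs nodes node visited → Spec_dfs nodes node visited (dfs nodes node visited)

-- ===== LEMMAS AND PROOFS =====

theorem aget?_mem {α : Type} (d : List (Int × α)) (k : Int) (v : α)
    (h : aget? d k = some v) : (k, v) ∈ d := by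
  induction d with
  | nil => simp [aget?] at h
  | cons p rest ih =>
    obtain ⟨k', v'⟩ := p
    by_cases hk : k' = k
    · subst hk; simp [aget?] at h; simp [h]
    · simp [aget?, hk] at h; exact List.mem_cons_of_mem _ (ih h)

theorem mem_keys_iff_isSome {α : Type} (d : List (Int × α)) (k : Int) :
    k ∈ d.map Prod.fst ↔ (aget? d k).isSome = true := by
  induction d with
  | nil => simp [aget?]
  | cons p rest ih =>
    obtain ⟨a, b⟩ := p
    by_cases ha : a = k
    · subst ha; simp [aget?]
    · rw [List.map_cons, List.mem_cons]
      have hka : ¬ (k = a) := fun h => ha h.symm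
      simp [aget?, ha, hka, ih]

theorem aget?_first_of_nodup (d : List (Int × Int)) (k t : Int)
    (hnd : (d.map Prod.fst).Nodup) (hm : (k, t) ∈ d) : aget? d k = some t := by
  induction d with
  | nil => simp at hm
  | cons p rest ih =>
    obtain ⟨a, b⟩ := p
    rw [List.map_cons, List.nodup_cons] at hnd
    rcases List.mem_cons.mp hm with h | h
    · injection h with h1 h2
      subst h1; subst h2
      simp [aget?]
    · have hak : a ≠ k := by
        intro he; subst he
        exact hnd.1 (List.mem_map.mpr ⟨(a, t), h, rfl⟩)
      simp [aget?, hak, ih hnd.2 h]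

theorem aget?_dset (d : List (Int × Int)) (k v k' : Int) :
    aget? (dset d k v) k' = if k = k' then some v else aget? d k' := by
  induction d with
  | nil => simp [dset, aget?]
  | cons p rest ih =>
    obtain ⟨a, b⟩ := p
    by_cases ha : a = k
    · subst ha
      by_cases h' : a = k' <;> simp [dset, aget?, h']
    · by_cases h' : a = k'
      · subst h'
        have : ¬ (k = a) := fun h => ha h.symm
        simp [dset, ha, aget?, this]
      · simp [dset, ha, aget?, h', ih]

theorem zeros_dset_eq (d : List (Int × Int)) (k : Int) (h : aget? d k = some 0) :
    zeros (dset d k 1) + 1 = zeros d := by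
  induction d with
  | nil => simp [aget?] at h
  | cons p rest ih =>
    obtain ⟨k', v'⟩ := p
    by_cases hk : k' = k
    · subst hk
      simp [aget?] at h
      subst h
      simp [dset, zeros]
    · simp [aget?, hk] at h
      have := ih h
      simp [dset, hk, zeros, List.countP_cons] at *
      omega

-- `zeros` never increases through the recursion
theorem zeros_runList_of (f : Nat) (nodes : List (Int × List Int))
    (hd : ∀ node vis, zeros (dfsFuel f nodes node vis).2 ≤ zeros vis) :
    ∀ l (c : Int) vis, zeros (runList f nodes l c vis).2 ≤ zeros vis := by
  intro l
  induction l with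
  | nil => intro c vis; simp [runList]
  | cons nb t ih =>
    intro c vis
    rw [runList]
    exact le_trans (ih _ _) (hd _ _)

theorem zeros_dfsFuel (f : Nat) (nodes : List (Int × List Int)) :
    ∀ node vis, zeros (dfsFuel f nodes node vis).2 ≤ zeros vis := by
  induction f with
  | zero => intro node vis; simp [dfsFuel]
  | succ g ih =>
    intro node vis
    rw [dfsFuel]
    cases hv : aget? vis node with
    | none => simp
    | some v =>
      by_cases h0 : v ≠ 0
      · simp [h0]
      · simp only [h0, if_false]
        simp only [not_not] at h0
        subst h0
        have h1 := zeros_runList_of g nodes ih ((aget? nodes node).getD []) 1 (dset vis node 1)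
        have h2 := zeros_dset_eq vis node hv
        simp at *
        omega

theorem zeros_runList (f : Nat) (nodes : List (Int × List Int)) (l : List Int) (c : Int)
    (vis : List (Int × Int)) : zeros (runList f nodes l c vis).2 ≤ zeros vis :=
  zeros_runList_of f nodes (zeros_dfsFuel f nodes) l c vis

-- additivity of the counter argument
theorem runList_shift (f : Nat) (nodes : List (Int × List Int)) :
    ∀ l (c : Int) vis, runList f nodes l c vis =
      (c + (runList f nodes l 0 vis).1, (runList f nodes l 0 vis).2) := by
  intro l
  induction l with
  | nil => intro c vis; simp [runList]
  | cons nb t ih =>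
    intro c vis
    rw [runList, runList]
    rw [ih, ih ((0 : Int) + _)]
    simp
    ring

theorem runList_append (f : Nat) (nodes : List (Int × List Int)) :
    ∀ l1 l2 (c : Int) vis, runList f nodes (l1 ++ l2) c vis =
      runList f nodes l2 (runList f nodes l1 c vis).1 (runList f nodes l1 c vis).2 := by
  intro l1
  induction l1 with
  | nil => intro l2 c vis; simp [runList]
  | cons nb t ih =>
    intro l2 c vis
    rw [List.cons_append, runList, runList]
    exact ih _ _ _

-- fuel irrelevance above the zeros bound
theorem fuel_irrel (nodes : List (Int × List Int)) :
    ∀ f1, (∀ f2 node vis, zeros vis < f1 → zeros vis < f2 →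
             dfsFuel f1 nodes node vis = dfsFuel f2 nodes node vis) ∧
          (∀ f2 l (c : Int) vis, zeros vis < f1 → zeros vis < f2 →
             runList f1 nodes l c vis = runList f2 nodes l c vis) := by
  intro f1
  induction f1 with
  | zero =>
    constructor <;> intro f2 <;> intros <;> omega
  | succ g ih =>
    have hP : ∀ f2 node vis, zeros vis < g + 1 → zeros vis < f2 →
        dfsFuel (g + 1) nodes node vis = dfsFuel f2 nodes node vis := by
      intro f2 node vis h1 h2
      cases f2 with
      | zero => omega
      | succ h =>
        rw [dfsFuel, dfsFuel]
        cases hv : aget? vis node with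
        | none => rfl
        | some v =>
          by_cases h0 : v ≠ 0
          · simp [h0]
          · simp only [h0, if_false]
            simp only [not_not] at h0
            subst h0
            have hz := zeros_dset_eq vis node hv
            have hrec := (ih).2 h ((aget? nodes node).getD []) 1 (dset vis node 1)
              (by omega) (by omega)
            exact hrec
    refine ⟨hP, ?_⟩
    intro f2 l
    induction l with
    | nil => intro c vis _ _; simp [runList]
    | cons nb t iht =>
      intro c vis h1 h2
      rw [runList, runList]
      have hd := hP f2 nb vis h1 h2
      rw [hd]
      have hz : zeros (dfsFuel f2 nodes nb vis).2 ≤ zeros vis := by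
        rw [← hd]; exact zeros_dfsFuel _ _ _ _
      exact iht _ _ (by omega) (by omega)

-- graph coherence: every visited key is in nodes, every neighbor is a visited key
def Coh (nodes : List (Int × List Int)) (vis : List (Int × Int)) : Prop :=
  (∀ p ∈ vis, (aget? nodes p.1).isSome = true) ∧
  (∀ p ∈ nodes, ∀ m ∈ p.2, (aget? vis m).isSome = true)

theorem mem_dset (d : List (Int × Int)) (k v : Int) :
    ∀ p ∈ dset d k v, p.1 = k ∨ p ∈ d := by
  induction d with
  | nil => intro p hp; simp [dset] at hp; simp [hp]
  | cons q rest ih =>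
    obtain ⟨a, b⟩ := q
    intro p hp
    by_cases ha : a = k
    · subst ha
      simp [dset] at hp
      rcases hp with h | h
      · simp [h]
      · exact Or.inr (List.mem_cons_of_mem _ h)
    · simp [dset, ha] at hp
      rcases hp with h | h
      · exact Or.inr (by simp [h])
      · rcases ih p h with h' | h'
        · exact Or.inl h'
        · exact Or.inr (List.mem_cons_of_mem _ h')

theorem isSome_dset (d : List (Int × Int)) (k v m : Int) (h : (aget? d m).isSome = true) :
    (aget? (dset d k v) m).isSome = true := by
  rw [aget?_dset]
  by_cases hk : k = m <;> simp [hk, h]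

theorem coh_dset (nodes : List (Int × List Int)) (vis : List (Int × Int)) (k t : Int)
    (hc : Coh nodes vis) (hk : aget? vis k = some t) : Coh nodes (dset vis k 1) := by
  obtain ⟨h1, h2⟩ := hc
  constructor
  · intro p hp
    rcases mem_dset vis k 1 p hp with h | h
    · rw [h]; exact h1 _ (aget?_mem _ _ _ hk)
    · exact h1 _ h
  · intro p hp m hm
    exact isSome_dset _ _ _ _ (h2 p hp m hm)

-- the core simulation: the explicit-stack loop computes the recursion's fold over the stack
theorem loopB_eq (nodes : List (Int × List Int)) :
    ∀ stack vis (cnt : Int), Coh nodes vis → (∀ v ∈ stack, (aget? vis v).isSome = true) →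
      ∀ f, zeros vis < f → loopB nodes stack vis cnt = (runList f nodes stack cnt vis).1 := by
  intro stack vis cnt
  induction stack, vis, cnt using loopB.induct nodes with
  | case1 vis cnt =>
    intro _ _ f _
    simp [loopB, runList]
  | case2 vis cnt v rest hv ih =>
    intro hc hs f hf
    cases f with
    | zero => omega
    | succ g =>
      have hz := zeros_dset_eq vis v hv
      have hcoh' := coh_dset nodes vis v 0 hc hv
      have hget : (aget? nodes v).isSome = true := hc.1 _ (aget?_mem _ _ _ hv)
      obtain ⟨adj, hadj⟩ := Option.isSome_iff_exists.mp hget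
      have hadjmem : ∀ m ∈ adj, (aget? vis m).isSome = true :=
        fun m hm => hc.2 _ (aget?_mem _ _ _ hadj) m hm
      rw [loopB, dif_pos hv, runList, dfsFuel]
      simp only [hv, ne_eq, not_true_eq_false, if_false]
      have hmem' : ∀ x ∈ ((aget? nodes v).getD []) ++ rest,
          (aget? (dset vis v 1) x).isSome = true := by
        intro x hx
        rcases List.mem_append.mp hx with h | h
        · exact isSome_dset _ _ _ _ (hadjmem x (by rwa [hadj] at h))
        · exact isSome_dset _ _ _ _ (hs x (by simp [h]))
      rw [ih hcoh' hmem' g (by omega)]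
      rw [runList_append]
      set r0 := runList g nodes ((aget? nodes v).getD []) 0 (dset vis v 1) with hr0
      have hshift := runList_shift g nodes ((aget? nodes v).getD []) (cnt + 1) (dset vis v 1)
      have hshift1 := runList_shift g nodes ((aget? nodes v).getD []) 1 (dset vis v 1)
      have hzr : zeros r0.2 ≤ zeros (dset vis v 1) := zeros_runList g nodes _ _ _
      have hirr := (fuel_irrel nodes (g + 1)).2 g rest
        (cnt + (runList g nodes ((aget? nodes v).getD []) 1 (dset vis v 1)).1)
        (runList g nodes ((aget? nodes v).getD []) 1 (dset vis v 1)).2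
        (by rw [hshift1]; simp only [← hr0]; omega) (by rw [hshift1]; simp only [← hr0]; omega)
      rw [hirr, hshift1, hshift]
      simp only [← hr0]
      simp [runList_shift g nodes rest (cnt + 1 + r0.1) r0.2,
            runList_shift g nodes rest (cnt + (1 + r0.1)) r0.2]
      ring
  | case3 vis cnt v rest hv ih =>
    intro hc hs f hf
    cases f with
    | zero => omega
    | succ g =>
      obtain ⟨t, ht⟩ := Option.isSome_iff_exists.mp (hs v (by simp))
      have ht0 : t ≠ 0 := by
        intro h; subst h; exact hv ht
      rw [loopB, dif_neg hv, runList, dfsFuel]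
      simp only [ht, ne_eq, ht0, not_false_eq_true, if_pos]
      rw [ih hc (fun x hx => hs x (by simp [hx])) (g + 1) hf]
      simp

-- ===== VERDICT (by name: the statement is the Claim_ definition above) =====
theorem dfs_spec : Claim_equal_dfs := by
  intro nodes node visited _ hpre
  obtain ⟨hnd, hmem, hdisj⟩ := hpre
  have hsome : (aget? visited node).isSome = true := (mem_keys_iff_isSome _ _).mp hmem
  obtain ⟨t, ht⟩ := Option.isSome_iff_exists.mp hsome
  unfold Spec_dfs dfs dfs_alt
  rcases hdisj with ⟨p, hp, hp1, hp2⟩ | hcohm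
  · -- start already visited: both sides are 0 directly
    obtain ⟨a, b⟩ := p
    simp only at hp1 hp2
    subst hp1
    have hab : aget? visited a = some b := aget?_first_of_nodup visited a b hnd hp
    have ht0 : aget? visited a ≠ some 0 := by
      rw [hab]; intro h; injection h with h'; exact hp2 h'
    have ht1 : t ≠ 0 := by
      rw [hab] at ht; injection ht with h'; subst h'; exact hp2
    rw [dfsFuel, loopB, dif_neg ht0, loopB]
    simp [ht, ht1]
  · have hcoh : Coh nodes visited := by
      refine ⟨fun p hp => (mem_keys_iff_isSome nodes p.1).mp (hcohm.1 p hp),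
        fun p hp m hm => (mem_keys_iff_isSome visited m).mp (hcohm.2 p hp m hm)⟩
    rw [loopB_eq nodes [node] visited 0 hcoh
      (by intro x hx; simp at hx; subst hx; exact hsome) (zeros visited + 1) (by omega)]
    rw [runList]
    simp only [runList]
    omega
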